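-- pv_equiv track=rewrite | github.com/hivdb/hivdb-DTG | preset/statistics.py | get_binary_mark_list
-- ===== SOURCE A (Python) =====
-- from collections import defaultdict
--
-- def get_binary_mark_list(records):
--
--     items = set([
--         j
--         for i in records
--         for j in i
--     ])
--
--     result = defaultdict(list)
--
--     for i in items:
--         for j in records:
--             result[i].append(i in j)
--
--     return result
-- ===== SOURCE B (Python) =====
-- from collections import defaultdict
--
-- def get_binary_mark_list(records):
--     items = list(set(j for i in records for j in i))
--     pos = {e: k for k, e in enumerate(items)}
--     n = len(records)
--     table = [[False] * n for _ in items]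
--     for idx, record in enumerate(records):
--         for e in record:
--             table[pos[e]][idx] = True
--     result = defaultdict(list)
--     for k, e in enumerate(items):
--         result[e] = table[k]
--     return result
-- ===== Notes on version B (the rewrite author's own statement) =====
-- stated objective: faster
-- what changed: B replaces A's per-(item,record) membership test and dict appends with an indexed boolean table: it numbers the items once, preallocates a row of False per item, makes a single scatter pass over the records setting table[pos[e]][idx] = True for each element actually present, and assembles the dict at the end.
import Mathlib
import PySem

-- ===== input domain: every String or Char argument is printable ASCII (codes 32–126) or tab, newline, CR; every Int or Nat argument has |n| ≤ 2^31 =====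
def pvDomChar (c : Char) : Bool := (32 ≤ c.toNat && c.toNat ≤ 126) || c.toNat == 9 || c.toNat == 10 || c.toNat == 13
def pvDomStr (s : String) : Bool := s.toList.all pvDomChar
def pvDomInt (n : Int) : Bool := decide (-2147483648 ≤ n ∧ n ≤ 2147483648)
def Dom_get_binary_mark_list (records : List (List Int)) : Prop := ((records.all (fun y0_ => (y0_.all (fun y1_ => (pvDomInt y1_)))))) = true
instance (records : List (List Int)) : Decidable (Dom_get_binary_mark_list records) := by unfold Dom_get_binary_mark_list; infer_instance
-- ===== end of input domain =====

-- B numbers the items, preallocates an all-False boolean table, fills it by one scatter pass over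
-- the records' elements and assembles the dict at the end, instead of A's membership test per
-- (item, record) pair with dict appends; the returned dicts are equal.

-- ===== PORT A =====
def get_binary_mark_list (records : List (List Int)) : List (Int × List Bool) :=
  let items : PySem.Set Int := PySem.Set.ofList (records.flatMap (fun i => i))
  let result : PySem.Dict Int (List Bool) :=
    items.foldl (fun d i =>
      records.foldl (fun d j => d.modify i [] (fun l => l ++ [decide (i ∈ j)])) d)
      PySem.Dict.empty
  result.items

-- ===== PORT B =====
def get_binary_mark_list_alt (records : List (List Int)) : List (Int × List Bool) :=
  let items : PySem.Set Int := PySem.Set.ofList (records.flatMap (fun i => i))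
  let pos : PySem.Dict Int Int :=
    (PySem.List.enumerate items).foldl (fun d p => d.insert p.2 p.1) PySem.Dict.empty
  let n : Nat := records.length
  let table : List (List Bool) := items.map (fun _ => List.replicate n false)
  -- table[pos[e]][idx] = True; pos[e] is exact via getD since every element e occurs in pos,
  -- and the row index is in range, so List.modify / List.set hit exactly Python's cells
  let table2 : List (List Bool) :=
    (PySem.List.enumerate records).foldl (fun t p =>
      p.2.foldl (fun t e => t.modify (pos.getD e 0).toNat (fun row => row.set p.1.toNat true)) t)
      table
  let result : PySem.Dict Int (List Bool) :=
    (PySem.List.enumerate items).foldl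
      (fun d p => d.insert p.2 (table2.getD p.1.toNat [])) PySem.Dict.empty
  result.items

-- ===== PRECONDITION & SPEC =====
def Spec_get_binary_mark_list (records : List (List Int)) (out : List (Int × List Bool)) : Prop := out = get_binary_mark_list_alt records
instance (records : List (List Int)) (out : List (Int × List Bool)) : Decidable (Spec_get_binary_mark_list records out) := by unfold Spec_get_binary_mark_list; infer_instance

-- ===== CLAIM (what is proved, stated in full; the proofs are below) =====
def Claim_equal_get_binary_mark_list : Prop := ∀ (records : List (List Int)), Dom_get_binary_mark_list records → Spec_get_binary_mark_list records (get_binary_mark_list records)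

-- ===== LEMMAS AND PROOFS =====

-- A's inner loop over the records, once key i is present with value v: it appends the marks.
theorem pvA_inner (rs : List (List Int)) (i : Int) :
    ∀ (d : PySem.Dict Int (List Bool)) (v : List Bool),
    rs.foldl (fun d j => d.modify i [] (fun l => l ++ [decide (i ∈ j)])) (d.insert i v)
      = d.insert i (v ++ rs.map (fun j => decide (i ∈ j))) := by
  induction rs with
  | nil => intro d v; simp
  | cons r rest ih =>
      intro d v
      simp only [List.foldl_cons, List.map_cons]
      have h1 : (d.insert i v).modify i [] (fun l => l ++ [decide (i ∈ r)])
          = d.insert i (v ++ [decide (i ∈ r)]) := by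
        simp [PySem.Dict.modify, PySem.Dict.getD_insert_self, PySem.Dict.insert_insert_self]
      rw [h1, ih]
      simp

-- A's outer loop over the (nodup, fresh) items, when records is nonempty.
theorem pvA_outer (r : List Int) (rs : List (List Int)) :
    ∀ (l : List Int) (d : PySem.Dict Int (List Bool)), l.Nodup →
    (∀ i ∈ l, d.contains i = false) →
    (l.foldl (fun d i =>
        (r :: rs).foldl (fun d j => d.modify i [] (fun l => l ++ [decide (i ∈ j)])) d) d).items
      = d.items ++ l.map (fun i => (i, (r :: rs).map (fun j => decide (i ∈ j)))) := by
  intro l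
  induction l with
  | nil => intro d _ _; simp
  | cons i rest ih =>
      intro d hnd hfresh
      rw [List.foldl_cons, List.foldl_cons]
      have hfi : d.contains i = false := hfresh i (by simp)
      have h1 : d.modify i [] (fun l => l ++ [decide (i ∈ r)])
          = d.insert i ([] ++ [decide (i ∈ r)]) := by
        simp [PySem.Dict.modify, PySem.Dict.getD_of_not_contains d _ hfi]
      rw [h1]
      simp only [List.nil_append]
      rw [pvA_inner]
      rw [ih (d.insert i ([decide (i ∈ r)] ++ rs.map (fun j => decide (i ∈ j))))
            (List.Nodup.of_cons hnd)
            (by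
              intro x hx
              rw [PySem.Dict.contains_insert]
              have hne : x ≠ i := by
                rintro rfl; exact (List.nodup_cons.mp hnd).1 hx
              simp [hne, hfresh x (List.mem_cons_of_mem _ hx)])]
      rw [PySem.Dict.items_insert_of_not_contains d _ hfi]
      simp

-- B's position dict leaves a key it never inserts untouched.
theorem pvPos_skip (e : Int) : ∀ (l : List Int) (s : Int) (d : PySem.Dict Int Int), e ∉ l →
    ((PySem.List.enumerate l s).foldl (fun d p => d.insert p.2 p.1) d).getD e 0 = d.getD e 0 := by
  intro l
  induction l with
  | nil => intro s d _; simp [PySem.List.enumerate_nil]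
  | cons x xs ih =>
      intro s d he
      rw [PySem.List.enumerate_cons, List.foldl_cons]
      rw [ih (s + 1) _ (fun h => he (List.mem_cons_of_mem _ h))]
      exact PySem.Dict.getD_insert_of_ne d _ _ (by rintro rfl; exact he List.mem_cons_self)

-- B's position dict maps the k-th item to s + k.
theorem pvPos_getD : ∀ (l : List Int), l.Nodup → ∀ (s : Int) (d : PySem.Dict Int Int),
    ∀ (k : Nat) (hk : k < l.length),
    ((PySem.List.enumerate l s).foldl (fun d p => d.insert p.2 p.1) d).getD l[k] 0 = s + k := by
  intro l
  induction l with
  | nil => intro _ s d k hk; simp at hk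
  | cons x xs ih =>
      intro hnd s d k hk
      rw [PySem.List.enumerate_cons, List.foldl_cons]
      cases k with
      | zero =>
          simp only [List.getElem_cons_zero]
          rw [pvPos_skip x xs (s + 1) _ (List.nodup_cons.mp hnd).1]
          simp [PySem.Dict.getD_insert_self]
      | succ k =>
          simp only [List.getElem_cons_succ]
          rw [ih (List.Nodup.of_cons hnd) (s + 1) _ k (by simpa using hk)]
          push_cast; ring

-- fold of modifies preserves the table length.
theorem pvScat_len (ik : Int → Nat) (f : Int → List Bool → List Bool) :
    ∀ (es : List Int) (t : List (List Bool)),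
    (es.foldl (fun t e => t.modify (ik e) (f e)) t).length = t.length := by
  intro es
  induction es with
  | nil => intro t; rfl
  | cons e rest ih => intro t; rw [List.foldl_cons, ih]; simp

-- List.modify seen through getD at an in-range index.
theorem pvGetD_modify (t : List (List Bool)) (i k : Nat) (f : List Bool → List Bool)
    (hk : k < t.length) :
    (t.modify i f).getD k [] = if i = k then f (t.getD k []) else t.getD k [] := by
  simp only [List.getD_eq_getElem?_getD, List.getElem?_modify, Option.map_eq_map]
  rw [List.getElem?_eq_getElem hk]
  by_cases h : i = k <;> simp [h]

-- B's inner scatter loop, read at row k whose item is x.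
theorem pvScat_inner (ik : Int → Nat) (idx k : Nat) (x : Int) :
    ∀ (es : List Int) (t : List (List Bool)), k < t.length →
    (∀ e ∈ es, (ik e = k ↔ e = x)) →
    (es.foldl (fun t e => t.modify (ik e) (fun row => row.set idx true)) t).getD k []
      = if x ∈ es then (t.getD k []).set idx true else t.getD k [] := by
  intro es
  induction es with
  | nil => intro t _ _; simp
  | cons e rest ih =>
      intro t hk h
      rw [List.foldl_cons]
      rw [ih _ (by simpa using hk) (fun e' he' => h e' (List.mem_cons_of_mem _ he'))]
      rw [pvGetD_modify t (ik e) k _ hk]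
      by_cases hex : e = x
      · have hik : ik e = k := (h e List.mem_cons_self).mpr hex
        have hxm : x ∈ e :: rest := by rw [List.mem_cons]; exact Or.inl hex.symm
        by_cases hm : x ∈ rest <;> simp [hik, hxm, hm, List.set_set]
      · have hik : ik e ≠ k := fun hh => hex ((h e List.mem_cons_self).mp hh)
        have hxe : (x ∈ e :: rest) ↔ (x ∈ rest) := by
          rw [List.mem_cons]
          exact or_iff_right (fun h1 => hex h1.symm)
        simp [hik, hxe]
-- B's outer scatter loop, read at row k whose item is x.
theorem pvScat_outer (ik : Int → Nat) (k : Nat) (x : Int) :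
    ∀ (ps : List (Int × List Int)) (t : List (List Bool)), k < t.length →
    (∀ p ∈ ps, ∀ e ∈ p.2, (ik e = k ↔ e = x)) →
    (ps.foldl (fun t p =>
        p.2.foldl (fun t e => t.modify (ik e) (fun row => row.set p.1.toNat true)) t) t).getD k []
      = ps.foldl (fun v p => if x ∈ p.2 then v.set p.1.toNat true else v) (t.getD k []) := by
  intro ps
  induction ps with
  | nil => intro t _ _; rfl
  | cons p rest ih =>
      intro t hk h
      simp only [List.foldl_cons]
      rw [ih _ (by rw [pvScat_len]; exact hk) (fun q hq => h q (List.mem_cons_of_mem _ hq))]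
      rw [pvScat_inner ik p.1.toNat k x p.2 t hk (h p List.mem_cons_self)]

-- The if-mem-set accumulator over enumerate equals the membership marks.
theorem pvB_value (i : Int) :
    ∀ (rs : List (List Int)) (pre : List Bool),
    (PySem.List.enumerate rs (pre.length : Int)).foldl
        (fun v p => if i ∈ p.2 then v.set p.1.toNat true else v)
        (pre ++ List.replicate rs.length false)
      = pre ++ rs.map (fun j => decide (i ∈ j)) := by
  intro rs
  induction rs with
  | nil => intro pre; simp [PySem.List.enumerate]
  | cons r rest ih =>
      intro pre
      rw [PySem.List.enumerate_cons]
      simp only [List.foldl_cons, List.length_cons, List.map_cons]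
      have hrep : List.replicate (rest.length + 1) false = false :: List.replicate rest.length false := rfl
      have hstep : (if i ∈ r then (pre ++ List.replicate (rest.length + 1) false).set
              ((pre.length : Int)).toNat true
            else pre ++ List.replicate (rest.length + 1) false)
          = (pre ++ [decide (i ∈ r)]) ++ List.replicate rest.length false := by
        rw [hrep]
        by_cases hm : i ∈ r
        · simp only [hm, if_pos, Int.toNat_natCast]
          rw [List.set_append]
          simp
        · simp [hm]
      rw [hstep]
      have hlen : ((pre.length : Int) + 1) = (((pre ++ [decide (i ∈ r)]).length : Nat) : Int) := by
        simp
      rw [hlen, ih (pre ++ [decide (i ∈ r)])]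
      simp

-- ===== VERDICT (by name: the statement is the Claim_ definition above) =====
theorem get_binary_mark_list_spec : Claim_equal_get_binary_mark_list := by
  intro records _
  unfold Spec_get_binary_mark_list get_binary_mark_list get_binary_mark_list_alt
  simp only []
  set flat := records.flatMap (fun i => i) with hflat
  set items : PySem.Set Int := PySem.Set.ofList flat with hitems
  have hnd : items.Nodup := PySem.Set.nodup_ofList flat
  cases hcase : items with
  | nil =>
      rw [hcase] at *
      simp [PySem.List.enumerate_nil]
  | cons i0 irest =>
      -- some item exists, hence some record is nonempty, hence records ≠ []
      obtain ⟨r, rs, hrr⟩ : ∃ r rs, records = r :: rs := by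
        cases hr : records with
        | nil =>
            exfalso
            have : i0 ∈ items := by rw [hcase]; simp
            rw [hitems, PySem.Set.mem_ofList, hflat, hr] at this
            simp at this
        | cons r rs => exact ⟨r, rs, rfl⟩
      rw [← hcase] at *
      -- A's side
      rw [hrr, pvA_outer r rs items PySem.Dict.empty hnd (by intro x _; rfl)]
      rw [show (PySem.Dict.empty : PySem.Dict Int (List Bool)).items = [] from rfl, List.nil_append]
      rw [← hrr]
      -- B's side: the final insert loop over fresh distinct keys
      set pos : PySem.Dict Int Int :=
        (PySem.List.enumerate items).foldl (fun d p => d.insert p.2 p.1) PySem.Dict.empty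
        with hpos
      set table2 : List (List Bool) :=
        (PySem.List.enumerate records).foldl (fun t p =>
          p.2.foldl (fun t e =>
            t.modify (pos.getD e 0).toNat (fun row => row.set p.1.toNat true)) t)
          (items.map (fun _ => List.replicate records.length false))
        with htable2
      rw [PySem.Dict.items_foldl_insert_fresh (PySem.List.enumerate items)
            (fun p => p.2) (fun p => table2.getD p.1.toNat []) PySem.Dict.empty
            (by intro a _; rfl)
            (by rw [PySem.List.map_snd_enumerate]; exact hnd)]
      rw [show (PySem.Dict.empty : PySem.Dict Int (List Bool)).items = [] from rfl, List.nil_append]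
      -- pos maps the k-th item to k
      have hposk : ∀ (k : Nat) (hk : k < items.length), pos.getD items[k] 0 = (k : Int) := by
        intro k hk
        rw [hpos]
        have := pvPos_getD items hnd 0 PySem.Dict.empty k hk
        simpa using this
      -- elementwise equality of the two item lists
      apply List.ext_getElem
      · simp [PySem.List.length_enumerate]
      · intro k hk1 hk2
        have hk : k < items.length := by
          simpa [PySem.List.length_enumerate] using hk1
        rw [List.getElem_map, List.getElem_map, PySem.List.getElem_enumerate]
        simp only [zero_add, Int.toNat_natCast]
        congr 1
        -- row k of the final table is the mark list of items[k]
        have hikiff : ∀ p ∈ PySem.List.enumerate records, ∀ e ∈ p.2,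
            ((pos.getD e 0).toNat = k ↔ e = items[k]) := by
          intro p hp e he
          have hmem : e ∈ items := by
            rw [hitems, PySem.Set.mem_ofList, hflat]
            refine List.mem_flatMap.mpr ⟨p.2, ?_, he⟩
            have := PySem.List.map_snd_enumerate records (0 : Int)
            exact this ▸ List.mem_map.mpr ⟨p, hp, rfl⟩
          obtain ⟨j, hj, hje⟩ := List.getElem_of_mem hmem
          subst hje
          rw [hposk j hj, Int.toNat_natCast]
          exact (List.Nodup.getElem_inj_iff hnd).symm
        rw [htable2, pvScat_outer ((fun e => (pos.getD e 0).toNat)) k items[k]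
              (PySem.List.enumerate records)
              (items.map (fun _ => List.replicate records.length false))
              (by simpa using hk) hikiff]
        have hinit : (items.map (fun _ => List.replicate records.length false)).getD k []
            = List.replicate records.length false := by
          rw [List.getD_eq_getElem?_getD, List.getElem?_map, List.getElem?_eq_getElem hk]
          rfl
        rw [hinit]
        have := pvB_value items[k] records []
        simpa using this.symm
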